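-- pv_equiv track=rewrite | github.com/KONG98/hitMaker | srtMakeHelper.py | GenerateSentencesTimeStamp
-- ===== SOURCE A (Python) =====
-- def GenerateSentencesTimeStamp(AudioChunks):
--     BeginTime = 0
--     TimeStampChunks = []
--     Index = list(range(len(AudioChunks)))
--     for i in Index:
--         CLen = len(AudioChunks[i])
--         TimeStampChunks.append({"Begin": BeginTime, "End": BeginTime + CLen})
--         BeginTime = BeginTime + CLen
--     return TimeStampChunks
-- ===== SOURCE B (Python) =====
-- def GenerateSentencesTimeStamp(AudioChunks):
--     # Scan-then-pair: build the boundary table of cumulative offsets first,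
--     # then pair consecutive boundaries into the timestamp dicts.
--     bounds = [0]
--     for chunk in AudioChunks:
--         bounds.append(bounds[-1] + len(chunk))
--     return [{"Begin": b, "End": e} for b, e in zip(bounds, bounds[1:])]
-- ===== Notes on version B (the rewrite author's own statement) =====
-- stated objective: alternative
-- what changed: Replaces the index loop threading a running BeginTime accumulator with a scan-then-pair decomposition: first a boundary table of cumulative offsets, then zipping consecutive boundaries into the output dicts.
import Mathlib
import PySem

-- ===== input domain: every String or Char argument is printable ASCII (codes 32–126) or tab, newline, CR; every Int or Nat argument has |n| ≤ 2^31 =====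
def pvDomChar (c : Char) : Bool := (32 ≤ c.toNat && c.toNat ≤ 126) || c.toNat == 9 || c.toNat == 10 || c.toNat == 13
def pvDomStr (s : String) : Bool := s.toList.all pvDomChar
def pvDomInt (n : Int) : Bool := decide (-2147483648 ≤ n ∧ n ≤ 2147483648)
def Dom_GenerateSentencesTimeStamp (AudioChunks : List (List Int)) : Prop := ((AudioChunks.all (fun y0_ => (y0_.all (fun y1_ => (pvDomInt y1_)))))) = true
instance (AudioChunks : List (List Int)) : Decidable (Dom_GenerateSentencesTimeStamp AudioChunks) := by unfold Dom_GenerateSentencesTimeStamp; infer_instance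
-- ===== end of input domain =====

-- B replaces A's accumulator-threaded index loop by a boundary-table scan then pairing
-- consecutive boundaries (alternative decomposition, same O(n) cost).


-- ===== PORT A =====
def GenerateSentencesTimeStamp (AudioChunks : List (List Int)) : List (List (String × Int)) :=
  -- BeginTime = 0; TimeStampChunks = []; for i in range(len(AudioChunks)): ...
  let r := (PySem.List.pyRange 0 (AudioChunks.length : Int) 1).foldl
    (fun (st : Int × List (List (String × Int))) i =>
      let CLen : Int := ((PySem.List.pyGetD AudioChunks i []).length : Int)
      (st.1 + CLen, st.2 ++ [[("Begin", st.1), ("End", st.1 + CLen)]]))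
    (0, [])
  r.2

-- ===== PORT B =====
def GenerateSentencesTimeStamp_alt (AudioChunks : List (List Int)) : List (List (String × Int)) :=
  -- bounds = [0]; for chunk: bounds.append(bounds[-1] + len(chunk))
  -- (bounds is never empty, so bounds[-1] is its last element)
  let bounds : List Int := AudioChunks.foldl
    (fun bs chunk => bs ++ [bs.getLast?.getD 0 + (chunk.length : Int)]) [0]
  (bounds.zip (bounds.drop 1)).map (fun p => [("Begin", p.1), ("End", p.2)])

-- ===== PRECONDITION & SPEC =====
def Spec_GenerateSentencesTimeStamp (AudioChunks : List (List Int)) (out : List (List (String × Int))) : Prop := out = GenerateSentencesTimeStamp_alt AudioChunks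
instance (AudioChunks : List (List Int)) (out : List (List (String × Int))) : Decidable (Spec_GenerateSentencesTimeStamp AudioChunks out) := by unfold Spec_GenerateSentencesTimeStamp; infer_instance

-- ===== CLAIM (what is proved, stated in full; the proofs are below) =====
def Claim_equal_GenerateSentencesTimeStamp : Prop := ∀ (AudioChunks : List (List Int)), Dom_GenerateSentencesTimeStamp AudioChunks → Spec_GenerateSentencesTimeStamp AudioChunks (GenerateSentencesTimeStamp AudioChunks)

-- ===== LEMMAS AND PROOFS =====

-- reference boundary list: cumulative end-offsets starting after b
def refBounds (b : Int) : List (List Int) → List Int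
  | [] => []
  | c :: t => (b + (c.length : Int)) :: refBounds (b + (c.length : Int)) t

-- reference output starting at begin-time b
def refOut (b : Int) : List (List Int) → List (List (String × Int))
  | [] => []
  | c :: t => [("Begin", b), ("End", b + (c.length : Int))] :: refOut (b + (c.length : Int)) t

theorem foldlA_eq (xs : List (List Int)) : ∀ (b : Int) (acc : List (List (String × Int))),
    (xs.foldl (fun (st : Int × List (List (String × Int))) c =>
        (st.1 + (c.length : Int), st.2 ++ [[("Begin", st.1), ("End", st.1 + (c.length : Int))]]))
      (b, acc)).2 = acc ++ refOut b xs := by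
  induction xs with
  | nil => intro b acc; simp [refOut]
  | cons c t ih =>
      intro b acc
      simp only [List.foldl_cons, refOut, ih]
      simp

theorem foldlB_eq (xs : List (List Int)) : ∀ (pre : List Int) (b : Int),
    (xs.foldl (fun bs chunk => bs ++ [bs.getLast?.getD 0 + (chunk.length : Int)]) (pre ++ [b]))
      = pre ++ b :: refBounds b xs := by
  induction xs with
  | nil => intro pre b; simp [refBounds]
  | cons c t ih =>
      intro pre b
      simp only [List.foldl_cons, refBounds]
      have h1 : (pre ++ [b]).getLast?.getD 0 = b := by simp
      rw [h1]
      have h2 : pre ++ [b] ++ [b + (c.length : Int)] = (pre ++ [b]) ++ [b + (c.length : Int)] := rfl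
      rw [h2, ih (pre ++ [b]) (b + (c.length : Int))]
      simp

theorem zip_refBounds (xs : List (List Int)) : ∀ (b : Int),
    ((b :: refBounds b xs).zip (refBounds b xs)).map
        (fun p => [("Begin", p.1), ("End", p.2)]) = refOut b xs := by
  induction xs with
  | nil => intro b; simp [refBounds, refOut]
  | cons c t ih =>
      intro b
      simp only [refBounds, refOut, List.zip_cons_cons, List.map_cons]
      exact congrArg _ (ih (b + (c.length : Int)))

-- ===== VERDICT (by name: the statement is the Claim_ definition above) =====
theorem GenerateSentencesTimeStamp_spec : Claim_equal_GenerateSentencesTimeStamp := by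
  intro xs _
  unfold Spec_GenerateSentencesTimeStamp GenerateSentencesTimeStamp GenerateSentencesTimeStamp_alt
  rw [PySem.List.foldl_pyRange_zero_pyGetD' xs ([] : List Int)
    (fun (st : Int × List (List (String × Int))) c =>
      (st.1 + (c.length : Int), st.2 ++ [[("Begin", st.1), ("End", st.1 + (c.length : Int))]])) (0, [])]
  have hA := foldlA_eq xs 0 []
  have hB := foldlB_eq xs [] 0
  simp only [List.nil_append] at hA hB
  rw [hA, hB]
  have := zip_refBounds xs 0
  simpa using this.symm
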